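-- pv_equiv track=rewrite | github.com/zju3dv/MVN-AFM | compute_mask.py | compute_triangles
-- ===== SOURCE A (Python) =====
-- def compute_triangles(img_h, img_w):
--     triangles = []
--     for i in range(0,img_h-1):
--         for j in range(0,img_w-1):
--             idx0 = i*img_w + j
--             idx1 = i*img_w + j + 1
--             idx2 = (i+1)*img_w + j
--             idx3 = (i+1)*img_w + j + 1
--             triangles.append([idx0, idx2, idx1])
--             triangles.append([idx1, idx2, idx3])
--     return triangles
-- ===== SOURCE B (Python) =====
-- def compute_triangles(img_h, img_w):
--     # Build the triangles of the first grid row once, as translations of a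
--     # single-cell template; then translate that whole row down for each row.
--     if img_h <= 1 or img_w <= 1:
--         return []
--     w = img_w
--     cell = [[0, w, 1], [1, w, w + 1]]
--     row0 = [[v + j for v in t] for j in range(w - 1) for t in cell]
--     return [[v + i * w for v in t] for i in range(img_h - 1) for t in row0]
-- ===== Notes on version B (the rewrite author's own statement) =====
-- stated objective: alternative
-- what changed: Instead of recomputing the four corner indices per cell in nested loops, B builds the first-row triangle list once by translating a single-cell template across columns, then produces the whole mesh by translating that row list down by i*img_w for each row.
import Mathlib
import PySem

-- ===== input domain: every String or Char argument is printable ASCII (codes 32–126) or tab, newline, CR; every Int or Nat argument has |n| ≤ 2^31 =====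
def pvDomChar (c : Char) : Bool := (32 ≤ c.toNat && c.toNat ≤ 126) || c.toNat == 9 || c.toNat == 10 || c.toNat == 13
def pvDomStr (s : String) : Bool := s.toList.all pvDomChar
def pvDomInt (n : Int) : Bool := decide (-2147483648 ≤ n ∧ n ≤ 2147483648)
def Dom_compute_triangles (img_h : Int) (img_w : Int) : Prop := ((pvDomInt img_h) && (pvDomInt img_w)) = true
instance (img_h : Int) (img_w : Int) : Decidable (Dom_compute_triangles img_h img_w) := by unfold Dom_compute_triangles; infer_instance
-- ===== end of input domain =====

-- B builds the first-row triangle list once from a single-cell template and then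
-- translates that row list down for each grid row (objective: alternative, same cost).

-- ===== PORT A =====
def compute_triangles (img_h : Int) (img_w : Int) : List (List Int) :=
  (PySem.List.pyRange 0 (img_h - 1) 1).foldl (fun triangles i =>
    (PySem.List.pyRange 0 (img_w - 1) 1).foldl (fun triangles j =>
      let idx0 := i * img_w + j
      let idx1 := i * img_w + j + 1
      let idx2 := (i + 1) * img_w + j
      let idx3 := (i + 1) * img_w + j + 1
      (triangles ++ [[idx0, idx2, idx1]]) ++ [[idx1, idx2, idx3]]) triangles) []

-- ===== PORT B =====
def compute_triangles_alt (img_h : Int) (img_w : Int) : List (List Int) :=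
  if img_h ≤ 1 ∨ img_w ≤ 1 then []
  else
    let w := img_w
    let cell : List (List Int) := [[0, w, 1], [1, w, w + 1]]
    let row0 := (PySem.List.pyRange 0 (w - 1) 1).flatMap (fun j =>
      cell.map (fun t => t.map (fun v => v + j)))
    (PySem.List.pyRange 0 (img_h - 1) 1).flatMap (fun i =>
      row0.map (fun t => t.map (fun v => v + i * w)))

-- ===== PRECONDITION & SPEC =====
def Spec_compute_triangles (img_h : Int) (img_w : Int) (out : List (List Int)) : Prop := out = compute_triangles_alt img_h img_w
instance (img_h : Int) (img_w : Int) (out : List (List Int)) : Decidable (Spec_compute_triangles img_h img_w out) := by unfold Spec_compute_triangles; infer_instance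

-- ===== CLAIM (what is proved, stated in full; the proofs are below) =====
def Claim_equal_compute_triangles : Prop := ∀ (img_h : Int) (img_w : Int), Dom_compute_triangles img_h img_w → Spec_compute_triangles img_h img_w (compute_triangles img_h img_w)

-- ===== LEMMAS AND PROOFS =====

-- The two triangles of the cell whose top-left vertex index is b.
def pvTri (w b : Int) : List (List Int) :=
  [[b, b + w, b + 1], [b + 1, b + w, b + w + 1]]

-- A's double fold produces, for each cell (i, j), exactly pvTri of the base index.
theorem pvA_shape (img_h img_w : Int) :
    compute_triangles img_h img_w
      = (PySem.List.pyRange 0 (img_h - 1) 1).flatMap (fun i =>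
          (PySem.List.pyRange 0 (img_w - 1) 1).flatMap (fun j =>
            pvTri img_w (i * img_w + j))) := by
  unfold compute_triangles
  have hinner : ∀ (acc : List (List Int)) (i : Int),
      (PySem.List.pyRange 0 (img_w - 1) 1).foldl (fun triangles j =>
          (triangles ++ [[i * img_w + j, (i + 1) * img_w + j, i * img_w + j + 1]])
            ++ [[i * img_w + j + 1, (i + 1) * img_w + j, (i + 1) * img_w + j + 1]]) acc
        = acc ++ (PySem.List.pyRange 0 (img_w - 1) 1).flatMap (fun j => pvTri img_w (i * img_w + j)) := by
    intro acc i
    have hfun : (fun (triangles : List (List Int)) (j : Int) =>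
        (triangles ++ [[i * img_w + j, (i + 1) * img_w + j, i * img_w + j + 1]])
          ++ [[i * img_w + j + 1, (i + 1) * img_w + j, (i + 1) * img_w + j + 1]])
        = fun triangles j => triangles ++ pvTri img_w (i * img_w + j) := by
      funext triangles j
      simp only [pvTri, List.append_assoc, List.singleton_append]
      have : (i + 1) * img_w + j = i * img_w + j + img_w := by ring
      rw [this]
    rw [hfun, PySem.List.foldl_append_eq_flatMap]
  have houter : (fun (triangles : List (List Int)) (i : Int) =>
      (PySem.List.pyRange 0 (img_w - 1) 1).foldl (fun triangles j =>
          (triangles ++ [[i * img_w + j, (i + 1) * img_w + j, i * img_w + j + 1]])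
            ++ [[i * img_w + j + 1, (i + 1) * img_w + j, (i + 1) * img_w + j + 1]]) triangles)
      = fun triangles i =>
          triangles ++ (PySem.List.pyRange 0 (img_w - 1) 1).flatMap (fun j => pvTri img_w (i * img_w + j)) := by
    funext triangles i; exact hinner triangles i
  rw [houter, PySem.List.foldl_append_eq_flatMap, List.nil_append]

-- Translating the single-cell template by b, then by a, gives pvTri at a + b.
theorem pvCell_translate (w a b : Int) :
    List.map ((fun t : List Int => List.map (fun v => v + a) t) ∘ fun t => List.map (fun v => v + b) t)
        [[0, w, 1], [1, w, w + 1]] = pvTri w (a + b) := by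
  simp only [pvTri, Function.comp, List.map_cons, List.map_nil, List.cons.injEq, and_true]
  and_intros <;> ring

-- An empty integer pyRange.
theorem pvRange_empty {b : Int} (hb : b ≤ 0) : PySem.List.pyRange 0 b 1 = [] := by
  simp [PySem.List.pyRange]
  omega

-- ===== VERDICT (by name: the statement is the Claim_ definition above) =====
theorem compute_triangles_spec : Claim_equal_compute_triangles := by
  intro img_h img_w _
  show compute_triangles img_h img_w = compute_triangles_alt img_h img_w
  rw [pvA_shape]
  unfold compute_triangles_alt
  by_cases hguard : img_h ≤ 1 ∨ img_w ≤ 1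
  · rw [if_pos hguard]
    rcases hguard with hh | hw
    · rw [pvRange_empty (by omega : img_h - 1 ≤ 0)]; rfl
    · rw [pvRange_empty (by omega : img_w - 1 ≤ 0)]
      simp
  · rw [if_neg hguard]
    simp only [List.map_flatMap, List.map_map]
    apply List.flatMap_congr
    intro i _
    apply List.flatMap_congr
    intro j _
    exact (pvCell_translate img_w (i * img_w) j).symm
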